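-- pv_equiv track=rewrite | github.com/Japesh285/SIte_scrapper | app/job_detail_engine/utils/content_filter.py | _trim_and_dedup
-- ===== SOURCE A (Python) =====
-- def _trim_and_dedup(chunks: list[str], max_total_chars: int) -> list[str]:
--     """Trim each chunk, remove duplicates, enforce total character limit."""
--     if not chunks:
--         return []
--
--     trimmed = [c.strip() for c in chunks if c.strip()]
--
--     seen = set()
--     unique = []
--     for chunk in trimmed:
--         if chunk not in seen:
--             seen.add(chunk)
--             unique.append(chunk)
--
--     unique = [c[:1500] for c in unique]
--
--     result = []
--     total = 0
--     for chunk in unique: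
--         if total + len(chunk) <= max_total_chars:
--             result.append(chunk)
--             total += len(chunk)
--         else:
--             remaining = max_total_chars - total
--             if remaining > 100:
--                 result.append(chunk[:remaining])
--             break
--
--     return result
-- ===== SOURCE B (Python) =====
-- def _trim_and_dedup(chunks: list[str], max_total_chars: int) -> list[str]:
--     """Dedup via dict.fromkeys, then pick the budget cut point by binary search
--     on a prefix-sum table instead of a greedy accumulating loop."""
--     unique = dict.fromkeys(s for c in chunks if (s := c.strip()))
--     pieces = [u[:1500] for u in unique]
--     prefix = [0]
--     for p in pieces:
--         prefix.append(prefix[-1] + len(p))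
--     # largest k with prefix[k] <= max_total_chars (0 if none): binary search,
--     # valid because prefix is nondecreasing
--     lo, hi = 0, len(pieces)
--     while lo < hi:
--         mid = (lo + hi + 1) // 2
--         if prefix[mid] <= max_total_chars:
--             lo = mid
--         else:
--             hi = mid - 1
--     k = lo
--     result = pieces[:k]
--     if k < len(pieces):
--         remaining = max_total_chars - prefix[k]
--         if remaining > 100:
--             result.append(pieces[k][:remaining])
--     return result
-- ===== Notes on version B (the rewrite author's own statement) =====
-- stated objective: alternative
-- what changed: Dedup is done with dict.fromkeys instead of a seen-set loop, and the greedy accumulating budget loop is replaced by a prefix-sum table plus a binary search for the cut index k, after which the answer is the slice pieces[:k] plus an optional partial piece.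
import Mathlib
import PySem

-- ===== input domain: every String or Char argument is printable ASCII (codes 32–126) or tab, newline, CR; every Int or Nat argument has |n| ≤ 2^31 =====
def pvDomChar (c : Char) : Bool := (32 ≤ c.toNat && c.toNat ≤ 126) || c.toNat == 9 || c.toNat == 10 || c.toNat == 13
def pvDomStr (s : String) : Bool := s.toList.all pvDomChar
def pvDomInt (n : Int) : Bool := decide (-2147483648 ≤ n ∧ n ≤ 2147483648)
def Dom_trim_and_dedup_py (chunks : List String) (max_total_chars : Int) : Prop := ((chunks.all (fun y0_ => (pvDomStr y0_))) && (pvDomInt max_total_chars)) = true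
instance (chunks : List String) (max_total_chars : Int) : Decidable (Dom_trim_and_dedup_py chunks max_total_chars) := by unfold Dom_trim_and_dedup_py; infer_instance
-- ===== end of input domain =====

-- B replaces A's seen-set dedup loop by dict.fromkeys and A's greedy accumulating budget
-- loop by a prefix-sum table with a binary search for the cut index; objective: alternative
-- (a structurally different algorithm of similar cost). Return values proved equal everywhere.

-- ===== PORT A =====
-- A's final budget loop (with its break) as structural recursion over `unique`.
def pvABudget (unique : List String) (result : List String) (total : Int)
    (max_total_chars : Int) : List String :=
  match unique with
  | [] => result
  | chunk :: rest =>
    if total + PySem.Str.len chunk ≤ max_total_chars then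
      pvABudget rest (result ++ [chunk]) (total + PySem.Str.len chunk) max_total_chars
    else
      let remaining := max_total_chars - total
      if remaining > 100 then result ++ [PySem.Str.slice chunk none (some remaining)]
      else result

def trim_and_dedup_py (chunks : List String) (max_total_chars : Int) : List String :=
  if chunks = [] then []
  else
    let trimmed := chunks.filterMap (fun c =>
      let s := PySem.Str.strip c; if s = "" then none else some s)
    let st := trimmed.foldl (fun (st : PySem.Set String × List String) chunk =>
      if PySem.Set.contains st.1 chunk then st
      else (PySem.Set.add st.1 chunk, st.2 ++ [chunk])) (PySem.Set.empty, [])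
    let unique := st.2.map (fun c => PySem.Str.slice c none (some 1500))
    pvABudget unique [] 0 max_total_chars

-- ===== PORT B =====
-- B's hand-written binary search: largest k in [lo,hi] with prefix[k] <= m (invariant
-- keeps the answer in [lo,hi]). prefix[mid] is in range whenever hi ≤ len prefix - 1,
-- which every call site maintains, so getD is exact here.
def pvBsearch (pre : List Int) (m : Int) (lo hi : Nat) : Nat :=
  if h : lo < hi then
    let mid := (lo + hi + 1) / 2
    if pre.getD mid 0 ≤ m then pvBsearch pre m mid hi
    else pvBsearch pre m lo (mid - 1)
  else lo
termination_by hi - lo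
decreasing_by all_goals omega

def trim_and_dedup_py_alt (chunks : List String) (max_total_chars : Int) : List String :=
  -- dict.fromkeys(s for c in chunks if (s := c.strip())) = ordered dedup of the stripped, nonempty chunks
  let unique := PySem.List.dedup (chunks.filterMap (fun c =>
    let s := PySem.Str.strip c; if s = "" then none else some s))
  let pieces := unique.map (fun u => PySem.Str.slice u none (some 1500))
  -- prefix-sum table: prefix[-1] is the last element, always present since prefix starts [0]
  let pre := pieces.foldl (fun pre p =>
    pre ++ [PySem.List.pyGetD pre (-1) 0 + PySem.Str.len p]) [0]
  let k := pvBsearch pre max_total_chars 0 pieces.length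
  let result := PySem.List.slice pieces none (some (k : Int))
  if k < pieces.length then
    let remaining := max_total_chars - pre.getD k 0   -- prefix[k], k ≤ len pieces so in range
    if remaining > 100 then
      result ++ [PySem.Str.slice (pieces.getD k "") none (some remaining)]  -- pieces[k], in range
    else result
  else result

-- ===== PRECONDITION & SPEC =====
def Spec_trim_and_dedup_py (chunks : List String) (max_total_chars : Int) (out : List String) : Prop := out = trim_and_dedup_py_alt chunks max_total_chars
instance (chunks : List String) (max_total_chars : Int) (out : List String) : Decidable (Spec_trim_and_dedup_py chunks max_total_chars out) := by unfold Spec_trim_and_dedup_py; infer_instance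

-- ===== CLAIM (what is proved, stated in full; the proofs are below) =====
def Claim_equal_trim_and_dedup_py : Prop := ∀ (chunks : List String) (max_total_chars : Int), Dom_trim_and_dedup_py chunks max_total_chars → Spec_trim_and_dedup_py chunks max_total_chars (trim_and_dedup_py chunks max_total_chars)

-- ===== LEMMAS AND PROOFS =====

-- A's (seen-set, unique-list) fold keeps both components equal, so unique = Set-fold of the input.
theorem pvAfold_pair (l : List String) (s : List String) :
    (l.foldl (fun (st : PySem.Set String × List String) chunk =>
      if PySem.Set.contains st.1 chunk then st
      else (PySem.Set.add st.1 chunk, st.2 ++ [chunk])) (s, s)).2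
    = l.foldl PySem.Set.add s := by
  induction l generalizing s with
  | nil => rfl
  | cons x xs ih =>
    simp only [List.foldl_cons]
    by_cases hm : x ∈ s
    · simpa [PySem.Set.contains, PySem.Set.add, hm] using ih s
    · simpa [PySem.Set.contains, PySem.Set.add, hm] using ih (s ++ [x])

-- Total length of the first k pieces.
def pvSumTake : List String → Nat → Int
  | _, 0 => 0
  | [], _ + 1 => 0
  | p :: r, k + 1 => PySem.Str.len p + pvSumTake r k

-- Number of pieces A's greedy budget loop takes whole.
def pvGreedyK (ps : List String) (total m : Int) : Nat :=
  match ps with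
  | [] => 0
  | p :: r => if total + PySem.Str.len p ≤ m then pvGreedyK r (total + PySem.Str.len p) m + 1 else 0

theorem pvSumTake_nonneg_step (p : String) : (0 : Int) ≤ PySem.Str.len p := by
  simp [PySem.Str.len_eq]

theorem pvSumTake_mono (ps : List String) (j k : Nat) (h : j ≤ k) :
    pvSumTake ps j ≤ pvSumTake ps k := by
  induction ps generalizing j k with
  | nil => cases j <;> cases k <;> simp [pvSumTake]
  | cons p r ih =>
    cases j with
    | zero =>
      cases k with
      | zero => simp [pvSumTake]
      | succ k' =>
        have h1 : (0:Int) ≤ pvSumTake r k' := by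
          simpa [pvSumTake] using ih 0 k' (Nat.zero_le _)
        have := pvSumTake_nonneg_step p
        simp only [pvSumTake]; omega
    | succ j' =>
      cases k with
      | zero => omega
      | succ k' =>
        have := ih j' k' (by omega)
        simp only [pvSumTake]; omega

-- Greedy count properties: bounded, feasible, maximal.
theorem pvGreedy_props (ps : List String) (total m : Int) :
    pvGreedyK ps total m ≤ ps.length ∧
    (pvGreedyK ps total m = 0 ∨ total + pvSumTake ps (pvGreedyK ps total m) ≤ m) ∧
    (pvGreedyK ps total m = ps.length ∨
      ¬ (total + pvSumTake ps (pvGreedyK ps total m + 1) ≤ m)) := by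
  induction ps generalizing total with
  | nil => simp [pvGreedyK, pvSumTake]
  | cons p r ih =>
    by_cases hfit : total + PySem.Str.len p ≤ m
    · obtain ⟨h1, h2, h3⟩ := ih (total + PySem.Str.len p)
      have hg : pvGreedyK (p :: r) total m = pvGreedyK r (total + PySem.Str.len p) m + 1 := by
        simp only [pvGreedyK, if_pos hfit]
      refine ⟨?_, ?_, ?_⟩
      · rw [hg]; simp only [List.length_cons]; omega
      · right; rw [hg]; simp only [pvSumTake]
        rcases h2 with h2 | h2
        · rw [h2]; simp only [pvSumTake]; omega
        · omega
      · rw [hg]; simp only [List.length_cons, pvSumTake]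
        rcases h3 with h3 | h3
        · left; omega
        · right; omega
    · have hg : pvGreedyK (p :: r) total m = 0 := by
        simp only [pvGreedyK, if_neg hfit]
      refine ⟨by rw [hg]; simp, Or.inl hg, Or.inr ?_⟩
      rw [hg]; simp only [pvSumTake]
      omega

-- Characterisation of A's budget loop by the greedy count.
theorem pvABudget_char (ps : List String) (res : List String) (total m : Int) :
    pvABudget ps res total m =
      res ++ ps.take (pvGreedyK ps total m) ++
      (if pvGreedyK ps total m < ps.length then
        (if m - (total + pvSumTake ps (pvGreedyK ps total m)) > 100
         then [PySem.Str.slice (ps.getD (pvGreedyK ps total m) "") none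
                (some (m - (total + pvSumTake ps (pvGreedyK ps total m))))]
         else [])
       else []) := by
  induction ps generalizing res total with
  | nil => simp [pvABudget, pvGreedyK]
  | cons p r ih =>
    by_cases hfit : total + PySem.Str.len p ≤ m
    · simp only [pvABudget, hfit, if_true, pvGreedyK, List.length_cons]
      rw [ih]
      simp only [List.take_succ_cons, List.getD_cons_succ, pvSumTake]
      have harith : ∀ x : Int, total + PySem.Str.len p + x = total + (PySem.Str.len p + x) := by
        intro x; ring
      rw [harith]
      simp only [Nat.add_lt_add_iff_right]
      simp
    · simp only [pvABudget, pvGreedyK, hfit, if_false]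
      simp [pvSumTake]
      split_ifs with h1 <;> simp_all

-- The prefix table's tail, starting from running total t.
def pvTail (ps : List String) (t : Int) : List Int :=
  match ps with
  | [] => []
  | p :: r => (t + PySem.Str.len p) :: pvTail r (t + PySem.Str.len p)

-- B's foldl builds exactly acc ++ pvTail ps (last acc).
theorem pvPrefix_fold (ps : List String) (acc : List Int) (x : Int) :
    ps.foldl (fun pre p => pre ++ [PySem.List.pyGetD pre (-1) 0 + PySem.Str.len p])
      (acc ++ [x]) = acc ++ [x] ++ pvTail ps x := by
  induction ps generalizing acc x with
  | nil => simp [pvTail]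
  | cons p r ih =>
    simp only [List.foldl_cons, pvTail]
    rw [PySem.List.pyGetD_neg_one_append_singleton]
    have := ih (acc ++ [x]) (x + PySem.Str.len p)
    simpa using this

-- Reading the prefix table: entry j is the sum of the first j piece lengths (plus t).
theorem pvPrefix_get (ps : List String) (t : Int) (j : Nat) (hj : j ≤ ps.length) :
    (t :: pvTail ps t).getD j 0 = t + pvSumTake ps j := by
  induction ps generalizing t j with
  | nil =>
    have hj0 : j = 0 := Nat.le_zero.mp (by simpa using hj)
    subst hj0
    simp [pvTail, pvSumTake]
  | cons p r ih =>
    cases j with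
    | zero => simp [pvSumTake]
    | succ j' =>
      have := ih (t + PySem.Str.len p) j' (by simpa using hj)
      simp only [pvTail, List.getD_cons_succ, pvSumTake] at *
      omega

-- The binary search finds the greedy count.
theorem pvBsearch_eq (ps : List String) (m : Int) (lo hi : Nat) :
    lo ≤ pvGreedyK ps 0 m → pvGreedyK ps 0 m ≤ hi → hi ≤ ps.length →
    pvBsearch (0 :: pvTail ps 0) m lo hi = pvGreedyK ps 0 m := by
  obtain ⟨hg1, hg2, hg3⟩ := pvGreedy_props ps 0 m
  fun_induction pvBsearch (0 :: pvTail ps 0) m lo hi with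
  | case1 lo hi hlt mid htest ih =>
    intro h1 h2 h3
    -- prefix[mid] ≤ m: the answer is ≥ mid
    have hmid1 : lo < mid := by simp only [mid]; omega
    have hmid2 : mid ≤ hi := by simp only [mid]; omega
    rw [pvPrefix_get ps 0 mid (by omega)] at htest
    have hge : mid ≤ pvGreedyK ps 0 m := by
      by_contra hcon
      have hcon' : pvGreedyK ps 0 m < mid := by omega
      have h3' : ¬ (0 + pvSumTake ps (pvGreedyK ps 0 m + 1) ≤ m) := by
        rcases hg3 with h | h
        · omega
        · exact h
      have := pvSumTake_mono ps (pvGreedyK ps 0 m + 1) mid (by omega)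
      omega
    exact ih hge h2 h3
  | case2 lo hi hlt mid htest ih =>
    intro h1 h2 h3
    -- prefix[mid] > m: the answer is < mid
    have hmid1 : lo < mid := by simp only [mid]; omega
    have hmid2 : mid ≤ hi := by simp only [mid]; omega
    rw [pvPrefix_get ps 0 mid (by omega)] at htest
    have hle : pvGreedyK ps 0 m ≤ mid - 1 := by
      by_contra hcon
      have hcon' : mid ≤ pvGreedyK ps 0 m := by omega
      have hgpos : pvGreedyK ps 0 m ≠ 0 := by omega
      have hfeas : 0 + pvSumTake ps (pvGreedyK ps 0 m) ≤ m := by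
        rcases hg2 with h | h
        · omega
        · exact h
      have := pvSumTake_mono ps mid (pvGreedyK ps 0 m) hcon'
      omega
    exact ih h1 hle (by omega)
  | case3 lo hi hnlt =>
    intro h1 h2 h3
    omega

-- ===== VERDICT (by name: the statement is the Claim_ definition above) =====
theorem trim_and_dedup_py_spec : Claim_equal_trim_and_dedup_py := by
  intro chunks m _
  unfold Spec_trim_and_dedup_py
  -- name the common pieces
  set trimmed := chunks.filterMap (fun c =>
    let s := PySem.Str.strip c; if s = "" then none else some s) with htrimmed
  have hdedup : (trimmed.foldl (fun (st : PySem.Set String × List String) chunk =>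
      if PySem.Set.contains st.1 chunk then st
      else (PySem.Set.add st.1 chunk, st.2 ++ [chunk])) (PySem.Set.empty, [])).2
      = PySem.List.dedup trimmed := by
    rw [show ((PySem.Set.empty : PySem.Set String), ([] : List String))
          = (([] : List String), ([] : List String)) from rfl]
    rw [pvAfold_pair trimmed []]
    rw [PySem.List.dedup_eq_ofList, PySem.Set.ofList_eq_foldl]
  set pieces := (PySem.List.dedup trimmed).map
    (fun u => PySem.Str.slice u none (some 1500)) with hpieces
  -- B's prefix table
  have hpre : pieces.foldl (fun pre p =>
      pre ++ [PySem.List.pyGetD pre (-1) 0 + PySem.Str.len p]) ([0] : List Int)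
      = 0 :: pvTail pieces 0 := by
    simpa using pvPrefix_fold pieces [] 0
  obtain ⟨hg1, hg2, hg3⟩ := pvGreedy_props pieces 0 m
  have hk : pvBsearch (0 :: pvTail pieces 0) m 0 pieces.length = pvGreedyK pieces 0 m :=
    pvBsearch_eq pieces m 0 pieces.length (Nat.zero_le _) hg1 le_rfl
  -- B in normal form
  have hB : trim_and_dedup_py_alt chunks m =
      pieces.take (pvGreedyK pieces 0 m) ++
      (if pvGreedyK pieces 0 m < pieces.length then
        (if m - (0 + pvSumTake pieces (pvGreedyK pieces 0 m)) > 100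
         then [PySem.Str.slice (pieces.getD (pvGreedyK pieces 0 m) "") none
                (some (m - (0 + pvSumTake pieces (pvGreedyK pieces 0 m))))]
         else [])
       else []) := by
    simp only [trim_and_dedup_py_alt]
    rw [← htrimmed, ← hpieces, hpre, hk]
    rw [PySem.List.slice_to_natCast]
    by_cases hlt : pvGreedyK pieces 0 m < pieces.length
    · simp only [hlt, if_true]
      rw [pvPrefix_get pieces 0 (pvGreedyK pieces 0 m) (by omega)]
      split_ifs with h1 <;> simp
    · simp [hlt]
  by_cases h : chunks = []
  · have htr0 : trimmed = [] := by rw [htrimmed, h]; rfl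
    have hp0 : pieces = [] := by rw [hpieces, htr0]; rfl
    rw [hB, hp0]
    simp [trim_and_dedup_py, h, pvGreedyK]
  · -- A in the same normal form
    rw [hB]
    simp only [trim_and_dedup_py, if_neg h]
    rw [← htrimmed, hdedup, ← hpieces, pvABudget_char]
    simp
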